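-- pv_equiv track=rewrite | github.com/pedropreto/CodeAdvent | 2024/day7.py | get_all_configurations_new
-- ===== SOURCE A (Python) =====
-- def get_all_configurations_new(n, num_values):
--     # Generate all configurations for numbers in range [0, num_values - 1]
--     configurations = []
--     for i in range(num_values ** n):  # Use num_values as the base
--         # Convert the number to the desired base and pad with leading zeros
--         base_string = ""
--         num = i
--         for _ in range(n):
--             base_string = str(num % num_values) + base_string
--             num //= num_values
--         base_string = base_string.zfill(n)  # Padding (optional)
--
--         # Convert the base string to a list of integers
--         configuration = [int(digit) for digit in base_string]
--         configurations.append(configuration)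
--
--     return configurations
-- ===== SOURCE B (Python) =====
-- def get_all_configurations_new(n, num_values):
--     # Build the Cartesian product position by position instead of base-converting
--     # each index through a string: extend every prefix by each value in turn.
--     # Same lexicographic order as A for num_values <= 10; for num_values >= 11
--     # this returns the intended configurations (entries 0..num_values-1), where
--     # A decimal-splits multi-digit values.
--     configurations = [[]]
--     for _ in range(n):
--         configurations = [prefix + [value]
--                           for prefix in configurations
--                           for value in range(num_values)]
--         if not configurations:
--             break  # empty product stays empty
--     return configurations
-- ===== Notes on version B (the rewrite author's own statement) =====
-- stated objective: alternative
-- what changed: Replaced per-index base conversion via string building, zfill and re-parsing with an incremental Cartesian-product builder that extends every prefix by each value position by position.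
-- intended difference: For n >= 1 and num_values >= 11, A stringifies multi-digit values and re-parses the string one decimal character at a time, so a value like 10 appears as the two entries 1,0 (rows longer than n); B returns the intended configurations with entries 0..num_values-1. — e.g. on get_all_configurations_new(1, 11): A returns [[0], [1], [2], [3], [4], [5], [6], [7], [8], [9], [1, 0]], B returns [[0], [1], [2], [3], [4], [5], [6], [7], [8], [9], [10]]
-- outside the precondition, e.g. on get_all_configurations_new(2, -1): A returns [[0, 0]], B returns []
import Mathlib
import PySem

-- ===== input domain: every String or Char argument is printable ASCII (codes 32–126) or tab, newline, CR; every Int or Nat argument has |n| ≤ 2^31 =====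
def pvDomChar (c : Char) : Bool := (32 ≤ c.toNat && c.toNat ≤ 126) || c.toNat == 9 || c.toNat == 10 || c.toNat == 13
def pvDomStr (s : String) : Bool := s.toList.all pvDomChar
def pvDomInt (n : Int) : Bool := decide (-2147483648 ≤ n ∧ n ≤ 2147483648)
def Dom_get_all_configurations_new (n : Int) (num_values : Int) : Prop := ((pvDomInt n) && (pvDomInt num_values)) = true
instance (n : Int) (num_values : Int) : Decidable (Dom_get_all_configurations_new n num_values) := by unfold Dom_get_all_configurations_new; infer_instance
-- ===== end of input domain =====

-- B replaces A's per-index base conversion (string building + zfill + re-parsing)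
-- by an incremental Cartesian-product builder; for num_values ≥ 11 (region D_) B
-- returns the intended configurations where A decimal-splits multi-digit values.

-- ===== PORT A =====
-- strings are handled as List Char via PySem.Chars/PySem.Int.toChars (exact);
-- num_values ** n is ported as ^ on n.toNat (Python raises for n < 0, outside Pre_);
-- int(digit) on a one-char string is PySem.Int.ofChars? [c] (never none on Pre_ inputs).
def get_all_configurations_new (n : Int) (num_values : Int) : List (List Int) :=
  (PySem.List.pyRange 0 (num_values ^ n.toNat) 1).foldl (fun configurations i =>
    let p := (PySem.List.pyRange 0 n 1).foldl
        (fun (p : List Char × Int) _ =>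
          (PySem.Int.toChars (PySem.Int.mod p.2 num_values) ++ p.1,
           PySem.Int.floordiv p.2 num_values)) ([], i)
    let base_string := PySem.Chars.zfill p.1 n
    configurations ++ [base_string.map (fun c => ((PySem.Int.ofChars? [c]).getD 0))]) []

-- ===== PORT B =====
-- the 'for _ in range(n)' loop with its early 'break' is the structural recursion
-- on the remaining iteration count (n.toNat, since n < 0 means zero iterations)
def pvAltLoop (num_values : Int) : Nat → List (List Int) → List (List Int)
  | 0, configurations => configurations
  | k + 1, configurations =>
      let next := configurations.flatMap (fun pfx =>
        (PySem.List.pyRange 0 num_values 1).map (fun v => pfx ++ [v]))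
      if next = [] then next else pvAltLoop num_values k next

def get_all_configurations_new_alt (n : Int) (num_values : Int) : List (List Int) :=
  pvAltLoop num_values n.toNat [[]]

-- ===== PRECONDITION & SPEC =====
-- Pre_ excludes negative n (A always raises: num_values ** n is a float, TypeError,
-- or ZeroDivisionError for num_values = 0) and negative num_values with positive
-- even n, where A either raises ValueError on int('-') or (num_values = -1)
-- returns the accidental value [[0,...,0]] while B's product is naturally empty.
def Pre_get_all_configurations_new (n : Int) (num_values : Int) : Prop :=
  0 ≤ n ∧ (0 ≤ num_values ∨ n = 0 ∨ n % 2 = 1)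
instance (n : Int) (num_values : Int) : Decidable (Pre_get_all_configurations_new n num_values) := by unfold Pre_get_all_configurations_new; infer_instance
def pvWitness_get_all_configurations_new : Int × Int := (2, 3)

-- For n ≥ 1 and num_values ≥ 11, A stringifies each base-num_values digit and
-- re-parses the string one decimal character at a time, so a digit like 10 shows
-- up as the two entries 1,0 (rows longer than n); B returns the intended
-- configurations with entries 0..num_values-1.
def D_get_all_configurations_new (n : Int) (num_values : Int) : Prop :=
  1 ≤ n ∧ 11 ≤ num_values
instance (n : Int) (num_values : Int) : Decidable (D_get_all_configurations_new n num_values) := by unfold D_get_all_configurations_new; infer_instance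

def Spec_get_all_configurations_new (n : Int) (num_values : Int) (out : List (List Int)) : Prop := ¬ D_get_all_configurations_new n num_values → out = get_all_configurations_new_alt n num_values
instance (n : Int) (num_values : Int) (out : List (List Int)) : Decidable (Spec_get_all_configurations_new n num_values out) := by unfold Spec_get_all_configurations_new; infer_instance

def pvDiffWitness_get_all_configurations_new : Int × Int := (1, 11)
def pvDiffWitnessOut_get_all_configurations_new : (List (List Int)) × (List (List Int)) :=
  ([[0], [1], [2], [3], [4], [5], [6], [7], [8], [9], [1, 0]],
   [[0], [1], [2], [3], [4], [5], [6], [7], [8], [9], [10]])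

-- ===== CLAIM (what is proved, stated in full; the proofs are below) =====
def Claim_unchanged_get_all_configurations_new : Prop := ∀ (n : Int) (num_values : Int), Dom_get_all_configurations_new n num_values → Pre_get_all_configurations_new n num_values → Spec_get_all_configurations_new n num_values (get_all_configurations_new n num_values)
def Claim_changed_get_all_configurations_new : Prop := Dom_get_all_configurations_new (pvDiffWitness_get_all_configurations_new.1) (pvDiffWitness_get_all_configurations_new.2) ∧ Pre_get_all_configurations_new (pvDiffWitness_get_all_configurations_new.1) (pvDiffWitness_get_all_configurations_new.2) ∧ D_get_all_configurations_new (pvDiffWitness_get_all_configurations_new.1) (pvDiffWitness_get_all_configurations_new.2) ∧ get_all_configurations_new (pvDiffWitness_get_all_configurations_new.1) (pvDiffWitness_get_all_configurations_new.2) = pvDiffWitnessOut_get_all_configurations_new.1 ∧ get_all_configurations_new_alt (pvDiffWitness_get_all_configurations_new.1) (pvDiffWitness_get_all_configurations_new.2) = pvDiffWitnessOut_get_all_configurations_new.2 ∧ pvDiffWitnessOut_get_all_configurations_new.1 ≠ pvDiffWitnessOut_get_all_configurations_new.2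
def Claim_exact_get_all_configurations_new : Prop := ∀ (n : Int) (num_values : Int), Dom_get_all_configurations_new n num_values → Pre_get_all_configurations_new n num_values → D_get_all_configurations_new n num_values → get_all_configurations_new n num_values ≠ get_all_configurations_new_alt n num_values

-- ===== LEMMAS AND PROOFS =====


theorem pv_zfill_id (cs : List Char) (w : Int) (h : w.toNat ≤ cs.length) : PySem.Chars.zfill cs w = cs := by
  simp only [PySem.Chars.zfill]; rw [if_pos (by omega)]

def pvDigitsBE : Nat → Int → Int → List Int
  | 0, _, _ => []
  | k + 1, m, i => pvDigitsBE k m (PySem.Int.floordiv i m) ++ [PySem.Int.mod i m]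

theorem pv_range_mul (a b : Nat) :
    List.range (a * b) = (List.range a).flatMap (fun q => (List.range b).map (fun r => q * b + r)) := by
  induction a with
  | zero => simp
  | succ a ih =>
      rw [Nat.succ_mul, List.range_add, List.range_succ, ih]
      simp [List.flatMap_append]

-- step congruence for B
theorem pv_step (m : Int) (M : Nat) (hm : m = (M:Int)) (hM : 0 < M) (N : Nat) (q r : Nat) (hr : r < M) :
    pvDigitsBE (N+1) m ((q * M + r : Nat) : Int) = pvDigitsBE N m (q : Int) ++ [(r : Int)] := by
  have h1 : PySem.Int.floordiv ((q * M + r : Nat) : Int) m = (q : Int) := by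
    rw [hm, PySem.Int.floordiv_natCast]
    congr 1
    rw [Nat.mul_comm q M, Nat.mul_add_div hM, Nat.div_eq_of_lt hr]
    omega
  have h2 : PySem.Int.mod ((q * M + r : Nat) : Int) m = (r : Int) := by
    rw [hm, PySem.Int.mod_natCast]
    congr 1
    rw [Nat.mul_comm q M, Nat.mul_add_mod, Nat.mod_eq_of_lt hr]
  simp only [pvDigitsBE]
  rw [h1, h2]



theorem pv_B_aux (m : Int) (M : Nat) (hm : m = (M:Int)) (hM : 0 < M) (N : Nat) :
    (fun configurations =>
        configurations.flatMap (fun pfx =>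
          (PySem.List.pyRange 0 m 1).map (fun v : Int => pfx ++ [v])))^[N] [[]]
    = (List.range (M ^ N)).map (fun i : Nat => pvDigitsBE N m (i : Int)) := by
  induction N with
  | zero => simp [pvDigitsBE]
  | succ N ih =>
      rw [Function.iterate_succ_apply', ih]
      have hpy : PySem.List.pyRange 0 m 1 = (List.range M).map (fun r : Nat => ((r:Nat) : Int)) := by
        rw [PySem.List.pyRange_one]
        simp [hm]
      rw [hpy, pow_succ, pv_range_mul]
      simp only [List.flatMap_map, List.map_flatMap, List.map_map]
      congr 1
      funext q
      apply List.map_congr_left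
      intro r hr
      have := pv_step m M hm hM N q r (List.mem_range.mp hr)
      simpa using this.symm

theorem pv_altLoop_eq_iterate (m : Int) (k : Nat) (cfgs : List (List Int)) :
    pvAltLoop m k cfgs
      = (fun configurations =>
          configurations.flatMap (fun pfx =>
            (PySem.List.pyRange 0 m 1).map (fun v : Int => pfx ++ [v])))^[k] cfgs := by
  induction k generalizing cfgs with
  | zero => rfl
  | succ k ih =>
      rw [Function.iterate_succ_apply]
      simp only [pvAltLoop]
      split_ifs with hnil
      · rw [hnil, Function.iterate_fixed (by simp)]
      · exact ih _

theorem pv_B_eq (n m : Int) (M : Nat) (hm : m = (M:Int)) (hM : 0 < M) :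
    get_all_configurations_new_alt n m
      = (List.range (M ^ n.toNat)).map (fun i : Nat => pvDigitsBE n.toNat m (i : Int)) := by
  unfold get_all_configurations_new_alt
  rw [pv_altLoop_eq_iterate]
  exact pv_B_aux m M hm hM n.toNat


theorem pv_shift (m : Int) (l : List Int) (s : List Char) (j : Int) :
    (l.foldl (fun (p : List Char × Int) _ =>
        (PySem.Int.toChars (PySem.Int.mod p.2 m) ++ p.1, PySem.Int.floordiv p.2 m)) (s, j)).1
      = (l.foldl (fun (p : List Char × Int) _ =>
        (PySem.Int.toChars (PySem.Int.mod p.2 m) ++ p.1, PySem.Int.floordiv p.2 m)) ([], j)).1 ++ s := by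
  induction l generalizing s j with
  | nil => simp
  | cons x l ih =>
      simp only [List.foldl_cons]
      rw [ih, ih (PySem.Int.toChars (PySem.Int.mod j m) ++ [])]
      simp


theorem pv_digit (d : Int) (h0 : 0 ≤ d) (h9 : d ≤ 9) :
    (PySem.Int.toChars d).map (fun c => ((PySem.Int.ofChars? [c]).getD 0)) = [d] ∧
    (PySem.Int.toChars d).length = 1 := by
  interval_cases d <;> exact ⟨by decide, by decide⟩

theorem pv_inner (m : Int) (hm : 1 ≤ m) (hm' : m ≤ 10) (l : List Int) (j : Int) (hj : 0 ≤ j) :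
    ((l.foldl (fun (p : List Char × Int) _ =>
        (PySem.Int.toChars (PySem.Int.mod p.2 m) ++ p.1, PySem.Int.floordiv p.2 m)) ([], j)).1.map
          (fun c => ((PySem.Int.ofChars? [c]).getD 0)) = pvDigitsBE l.length m j)
    ∧ (l.foldl (fun (p : List Char × Int) _ =>
        (PySem.Int.toChars (PySem.Int.mod p.2 m) ++ p.1, PySem.Int.floordiv p.2 m)) ([], j)).1.length
        = l.length := by
  induction l generalizing j with
  | nil => simp [pvDigitsBE]
  | cons x l ih =>
      have hd0 : 0 ≤ PySem.Int.mod j m := by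
        rw [PySem.Int.mod_eq_emod_of_pos (show (0:Int) < m by omega)]
        exact Int.emod_nonneg j (by omega)
      have hd9 : PySem.Int.mod j m ≤ 9 := by
        rw [PySem.Int.mod_eq_emod_of_pos (show (0:Int) < m by omega)]
        have := Int.emod_lt_of_pos j (show (0:Int) < m by omega)
        omega
      have hq0 : 0 ≤ PySem.Int.floordiv j m := by
        rw [PySem.Int.floordiv_eq_ediv_of_pos (show (0:Int) < m by omega)]
        exact Int.ediv_nonneg hj (by omega)
      have hdig := pv_digit (PySem.Int.mod j m) hd0 hd9
      have ihq := ih (PySem.Int.floordiv j m) hq0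
      simp only [List.foldl_cons]
      rw [pv_shift]
      simp only [List.append_nil]
      constructor
      · rw [List.map_append, ihq.1, hdig.1]
        simp [pvDigitsBE]
      · rw [List.length_append, ihq.2, hdig.2, List.length_cons]

theorem pv_A_eq (n m : Int) (M : Nat) (hm : m = (M:Int)) (hM : 0 < M) (hm' : m ≤ 10) :
    get_all_configurations_new n m
      = (List.range (M ^ n.toNat)).map (fun i : Nat => pvDigitsBE n.toNat m (i : Int)) := by
  unfold get_all_configurations_new
  rw [PySem.List.foldl_append_singleton_eq_map]
  have hpow : m ^ n.toNat = ((M ^ n.toNat : Nat) : Int) := by rw [hm]; push_cast; ring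
  rw [hpow]
  simp only [PySem.List.pyRange_one, sub_zero, Int.toNat_natCast, List.nil_append, List.map_map]
  apply List.map_congr_left
  intro k hk
  have hm1 : (1:Int) ≤ m := by omega
  have hinner := pv_inner m hm1 hm' (List.map (fun k : Nat => (0:Int) + ↑k) (List.range n.toNat))
      ((0:Int) + (k:Int)) (by positivity)
  have hlen : (List.map (fun k : Nat => (0:Int) + ↑k) (List.range n.toNat)).length = n.toNat := by simp
  simp only [Function.comp]
  rw [pv_zfill_id _ n (by rw [hinner.2, hlen])]
  rw [hinner.1, hlen]
  simp


theorem pv_A_zero (m : Int) : get_all_configurations_new 0 m = [[]] := by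
  unfold get_all_configurations_new
  simp [PySem.List.pyRange_one, PySem.Chars.zfill, List.range_succ]

theorem pv_B_zero (m : Int) : get_all_configurations_new_alt 0 m = [[]] := by
  rfl

theorem pv_A_m0 (n : Int) (hn : 1 ≤ n) : get_all_configurations_new n 0 = [] := by
  unfold get_all_configurations_new
  rw [zero_pow (by omega : n.toNat ≠ 0), PySem.List.pyRange_one_eq_nil (le_refl 0)]
  rfl

theorem pv_B_le0 (n m : Int) (hn : 1 ≤ n) (hm : m ≤ 0) : get_all_configurations_new_alt n m = [] := by
  unfold get_all_configurations_new_alt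
  obtain ⟨k, hk⟩ : ∃ k, n.toNat = k + 1 := ⟨n.toNat - 1, by omega⟩
  rw [hk]
  simp [pvAltLoop, PySem.List.pyRange_one_eq_nil hm]

theorem pv_A_neg (n m : Int) (hn : 1 ≤ n) (hodd : n % 2 = 1) (hm : m < 0) :
    get_all_configurations_new n m = [] := by
  unfold get_all_configurations_new
  have hoddN : Odd n.toNat := ⟨n.toNat / 2, by omega⟩
  rw [PySem.List.pyRange_one_eq_nil (le_of_lt (hoddN.pow_neg hm))]
  rfl

theorem top (n m : Int) (hn : 0 ≤ n) (hm : 0 ≤ m ∨ n = 0 ∨ n % 2 = 1) (hnD : ¬ (1 ≤ n ∧ 11 ≤ m)) :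
    get_all_configurations_new n m = get_all_configurations_new_alt n m := by
  by_cases h0 : n = 0
  · subst h0; rw [pv_A_zero, pv_B_zero]
  · have hn1 : 1 ≤ n := by omega
    by_cases hneg : m < 0
    · have hodd : n % 2 = 1 := by rcases hm with h | h | h <;> omega
      rw [pv_A_neg n m hn1 hodd hneg, pv_B_le0 n m hn1 (by omega)]
    by_cases hm0 : m = 0
    · subst hm0; rw [pv_A_m0 n hn1, pv_B_le0 n 0 hn1 (le_refl 0)]
    · have hm10 : m ≤ 10 := by
        by_contra h; exact hnD ⟨hn1, by omega⟩
      rw [pv_A_eq n m m.toNat (by omega) (by omega) hm10,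
          pv_B_eq n m m.toNat (by omega) (by omega)]

theorem pv_digitsBE_length (k : Nat) (m i : Int) : (pvDigitsBE k m i).length = k := by
  induction k generalizing i with
  | zero => rfl
  | succ k ih => simp [pvDigitsBE, ih]

theorem pv_inner_zero (m : Int) (hm : 0 < m) (l : List Int) :
    (l.foldl (fun (p : List Char × Int) _ =>
        (PySem.Int.toChars (PySem.Int.mod p.2 m) ++ p.1, PySem.Int.floordiv p.2 m)) ([], 0)).1
      = List.replicate l.length '0' := by
  induction l with
  | nil => rfl
  | cons x l ih =>
      simp only [List.foldl_cons]
      rw [show PySem.Int.mod 0 m = 0 by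
            rw [PySem.Int.mod_eq_emod_of_pos hm]; exact Int.zero_emod m,
          show PySem.Int.floordiv 0 m = 0 by
            rw [PySem.Int.floordiv_eq_ediv_of_pos hm]; exact Int.zero_ediv m,
          show PySem.Int.toChars 0 = ['0'] by decide]
      rw [pv_shift, ih]
      simp [List.replicate_succ']

theorem pv_inner_ten (m : Int) (hm : 11 ≤ m) (x : Int) (l : List Int) :
    ((x :: l).foldl (fun (p : List Char × Int) _ =>
        (PySem.Int.toChars (PySem.Int.mod p.2 m) ++ p.1, PySem.Int.floordiv p.2 m)) ([], 10)).1
      = List.replicate l.length '0' ++ ['1', '0'] := by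
  simp only [List.foldl_cons]
  rw [show PySem.Int.mod 10 m = 10 by
        rw [PySem.Int.mod_eq_emod_of_pos (by omega)]
        exact Int.emod_eq_of_lt (by omega) (by omega),
      show PySem.Int.floordiv 10 m = 0 by
        rw [PySem.Int.floordiv_eq_ediv_of_pos (by omega)]
        exact Int.ediv_eq_zero_of_lt (by omega) (by omega),
      show PySem.Int.toChars 10 = ['1', '0'] by decide]
  rw [pv_shift, pv_inner_zero m (by omega)]
  simp

theorem pv_tight (n m : Int) (hn : 1 ≤ n) (hm : 11 ≤ m) :
    get_all_configurations_new n m ≠ get_all_configurations_new_alt n m := by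
  intro hAB
  have hB := pv_B_eq n m m.toNat (by omega) (by omega)
  set N := n.toNat with hN
  set M := m.toNat with hM
  have hM11 : 11 ≤ M := by omega
  have h10 : 10 < M ^ N := by
    calc 10 < M := by omega
    _ ≤ M ^ N := Nat.le_self_pow (by omega) M
  -- A as a map over range
  rw [get_all_configurations_new] at hAB
  rw [PySem.List.foldl_append_singleton_eq_map] at hAB
  have hpow : m ^ N = ((M ^ N : Nat) : Int) := by
    rw [show m = (M:Int) by omega]; push_cast; ring
  rw [hpow] at hAB
  simp only [PySem.List.pyRange_one, sub_zero, Int.toNat_natCast, List.nil_append,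
    List.map_map] at hAB
  rw [hB] at hAB
  have h := congrArg (fun xs => xs[10]?) hAB
  simp only [List.getElem?_map, List.getElem?_range, h10] at h
  simp only [Option.map_some, Function.comp_apply] at h
  have h' := Option.some.inj h
  -- compare row lengths: A's row at index 10 has length N + 1, B's has length N
  have hlen := congrArg List.length h'
  obtain ⟨x, l', hl'⟩ := List.exists_cons_of_ne_nil
    (show List.map (fun k : Nat => (0:Int) + ↑k) (List.range N) ≠ [] by
      simp only [ne_eq, List.map_eq_nil_iff, List.range_eq_nil]
      omega)
  rw [show ((0:Int) + ((10:Nat):Int)) = 10 by norm_num, hl', pv_inner_ten m (by omega)] at hlen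
  have hll : l'.length + 1 = N := by
    have := congrArg List.length hl'
    simpa using this.symm
  rw [pv_zfill_id _ n (by simp; omega)] at hlen
  simp [pv_digitsBE_length] at hlen
  omega

-- ===== VERDICT (by name: the statement is the Claim_ definition above) =====
theorem get_all_configurations_new_spec : Claim_unchanged_get_all_configurations_new := by
  intro n m _ hPre hnD
  exact top n m hPre.1 hPre.2 (by simpa [D_get_all_configurations_new] using hnD)

theorem get_all_configurations_new_changed : Claim_changed_get_all_configurations_new := by
  unfold Claim_changed_get_all_configurations_new; decide

theorem get_all_configurations_new_tight : Claim_exact_get_all_configurations_new := by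
  intro n m _ _ hD
  exact pv_tight n m hD.1 hD.2
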